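-- pv_equiv track=rewrite | github.com/R-i-cks/Bioinform-tica | sequencias_aula2.py | all_stop
-- ===== SOURCE A (Python) =====
-- def traduzCodao (cod):
--     tc = {"GCT":"A", "GCC":"A", "GCA":"A", "GCG":"A",
--       "TGT":"C", "TGC":"C",
--       "GAT":"D", "GAC":"D",
--       "GAA":"E", "GAG":"E",
--       "TTT":"F", "TTC":"F",
--       "GGT":"G", "GGC":"G", "GGA":"G", "GGG":"G",
--       "CAT":"H", "CAC":"H",
--       "ATA":"I", "ATT":"I", "ATC":"I",
--       "AAA":"K", "AAG":"K",
--       "TTA":"L", "TTG":"L", "CTT":"L", "CTC":"L", "CTA":"L", "CTG":"L",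
--       "ATG":"M", "AAT":"N", "AAC":"N",
--       "CCT":"P", "CCC":"P", "CCA":"P", "CCG":"P",
--       "CAA":"Q", "CAG":"Q",
--       "CGT":"R", "CGC":"R", "CGA":"R", "CGG":"R", "AGA":"R", "AGG":"R",
--       "TCT":"S", "TCC":"S", "TCA":"S", "TCG":"S", "AGT":"S", "AGC":"S",
--       "ACT":"T", "ACC":"T", "ACA":"T", "ACG":"T",
--       "GTT":"V", "GTC":"V", "GTA":"V", "GTG":"V",
--       "TGG":"W",
--       "TAT":"Y", "TAC":"Y",
--       "TAA":"_", "TAG":"_", "TGA":"_"}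
--     if cod in tc:
--         aa = tc[cod]
--     else: aa = ""
--     return aa
--
-- def traduzSeq (seqDNA, iniPos= 0):
--     seqM = seqDNA.upper()
--     seqAA = ""
--     for pos in range(iniPos,len(seqM)-2,3):
--         codao = seqM[pos:pos+3]
--         seqAA += traduzCodao(codao)
--     return seqAA
--
-- def all_stop(dna):
--     codoes = traduzSeq(dna,0)
--     pos = []
--     i = 0
--     while i< len(codoes):
--         if codoes[i] == '_':
--             pos.append(i)
--         i +=1
--     return pos
-- ===== SOURCE B (Python) =====
-- def all_stop(dna):
--     seq = dna.upper()
--     pos = []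
--     aa = 0
--     for i in range(0, len(seq) - 2, 3):
--         cod = seq[i:i+3]
--         if all(c in "ACGT" for c in cod):
--             if cod in ("TAA", "TAG", "TGA"):
--                 pos.append(aa)
--             aa += 1
--     return pos
-- ===== Notes on version B (the rewrite author's own statement) =====
-- stated objective: faster
-- what changed: B never builds the intermediate amino-acid string: a single pass over the codon windows keeps an integer amino-acid index (advanced only for codons made of A/C/G/T, i.e. exactly the table's keys) and records the index at each stop codon, replacing A's translate-then-rescan two-phase pipeline and its 64-entry codon table lookup with a 4-letter membership test.
import Mathlib
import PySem

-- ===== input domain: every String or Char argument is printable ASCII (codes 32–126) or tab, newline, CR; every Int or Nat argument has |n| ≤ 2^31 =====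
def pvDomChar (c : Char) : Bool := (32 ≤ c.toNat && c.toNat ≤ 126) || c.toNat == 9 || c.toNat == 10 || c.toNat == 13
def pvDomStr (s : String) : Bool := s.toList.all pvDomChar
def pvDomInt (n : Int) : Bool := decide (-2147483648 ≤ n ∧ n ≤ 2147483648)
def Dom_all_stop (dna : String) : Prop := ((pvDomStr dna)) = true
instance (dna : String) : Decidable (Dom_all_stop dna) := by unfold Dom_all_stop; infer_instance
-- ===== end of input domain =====

-- B collapses A's translate-then-rescan pipeline into one pass that keeps an amino-acid
-- counter and never builds the intermediate amino-acid string (objective: faster, constant-factor; measured).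

-- ===== PORT A =====
-- the codon table 'tc' from traduzCodao, hoisted to a named constant
def tcTable : PySem.Dict (List Char) (List Char) := PySem.Dict.mk [
    (['G', 'C', 'T'], ['A']), (['G', 'C', 'C'], ['A']), (['G', 'C', 'A'], ['A']), (['G', 'C', 'G'], ['A']),
    (['T', 'G', 'T'], ['C']), (['T', 'G', 'C'], ['C']), (['G', 'A', 'T'], ['D']), (['G', 'A', 'C'], ['D']),
    (['G', 'A', 'A'], ['E']), (['G', 'A', 'G'], ['E']), (['T', 'T', 'T'], ['F']), (['T', 'T', 'C'], ['F']),
    (['G', 'G', 'T'], ['G']), (['G', 'G', 'C'], ['G']), (['G', 'G', 'A'], ['G']), (['G', 'G', 'G'], ['G']),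
    (['C', 'A', 'T'], ['H']), (['C', 'A', 'C'], ['H']), (['A', 'T', 'A'], ['I']), (['A', 'T', 'T'], ['I']),
    (['A', 'T', 'C'], ['I']), (['A', 'A', 'A'], ['K']), (['A', 'A', 'G'], ['K']), (['T', 'T', 'A'], ['L']),
    (['T', 'T', 'G'], ['L']), (['C', 'T', 'T'], ['L']), (['C', 'T', 'C'], ['L']), (['C', 'T', 'A'], ['L']),
    (['C', 'T', 'G'], ['L']), (['A', 'T', 'G'], ['M']), (['A', 'A', 'T'], ['N']), (['A', 'A', 'C'], ['N']),
    (['C', 'C', 'T'], ['P']), (['C', 'C', 'C'], ['P']), (['C', 'C', 'A'], ['P']), (['C', 'C', 'G'], ['P']),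
    (['C', 'A', 'A'], ['Q']), (['C', 'A', 'G'], ['Q']), (['C', 'G', 'T'], ['R']), (['C', 'G', 'C'], ['R']),
    (['C', 'G', 'A'], ['R']), (['C', 'G', 'G'], ['R']), (['A', 'G', 'A'], ['R']), (['A', 'G', 'G'], ['R']),
    (['T', 'C', 'T'], ['S']), (['T', 'C', 'C'], ['S']), (['T', 'C', 'A'], ['S']), (['T', 'C', 'G'], ['S']),
    (['A', 'G', 'T'], ['S']), (['A', 'G', 'C'], ['S']), (['A', 'C', 'T'], ['T']), (['A', 'C', 'C'], ['T']),
    (['A', 'C', 'A'], ['T']), (['A', 'C', 'G'], ['T']), (['G', 'T', 'T'], ['V']), (['G', 'T', 'C'], ['V']),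
    (['G', 'T', 'A'], ['V']), (['G', 'T', 'G'], ['V']), (['T', 'G', 'G'], ['W']), (['T', 'A', 'T'], ['Y']),
    (['T', 'A', 'C'], ['Y']), (['T', 'A', 'A'], ['_']), (['T', 'A', 'G'], ['_']), (['T', 'G', 'A'], ['_'])]

def traduzCodao (cod : List Char) : List Char :=
  match tcTable.get? cod with
  | some aa => aa
  | none => []

def traduzSeq (seqDNA : List Char) (iniPos : Int) : List Char :=
  let seqM := PySem.Chars.upper seqDNA
  (PySem.List.pyRange iniPos (PySem.Chars.len seqM - 2) 3).foldl
    (fun seqAA pos => seqAA ++ traduzCodao (PySem.List.slice seqM (some pos) (some (pos + 3)))) []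

-- Python's 'while i < len(codoes)' index scan, as the obvious structural recursion over the chars
def stopScan : List Char → Int → List Int → List Int
  | [], _, pos => pos
  | c :: rest, i, pos => stopScan rest (i + 1) (if c = '_' then pos ++ [i] else pos)

def all_stop (dna : String) : List Int :=
  let codoes := traduzSeq dna.toList 0
  stopScan codoes 0 []

-- ===== PORT B =====
def all_stop_alt (dna : String) : List Int :=
  let seq := PySem.Chars.upper dna.toList
  let r := (PySem.List.pyRange 0 (PySem.Chars.len seq - 2) 3).foldl
    (fun (st : List Int × Int) i =>
      let cod := PySem.List.slice seq (some i) (some (i + 3))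
      if cod.all (fun c => ['A', 'C', 'G', 'T'].contains c) then
        (if cod = ['T', 'A', 'A'] ∨ cod = ['T', 'A', 'G'] ∨ cod = ['T', 'G', 'A'] then
           st.1 ++ [st.2]
         else st.1,
         st.2 + 1)
      else st)
    ([], 0)
  r.1

-- ===== PRECONDITION & SPEC =====
def Spec_all_stop (dna : String) (out : List Int) : Prop := out = all_stop_alt dna
instance (dna : String) (out : List Int) : Decidable (Spec_all_stop dna out) := by unfold Spec_all_stop; infer_instance

-- ===== CLAIM (what is proved, stated in full; the proofs are below) =====
def Claim_equal_all_stop : Prop := ∀ (dna : String), Dom_all_stop dna → Spec_all_stop dna (all_stop dna)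

-- ===== LEMMAS AND PROOFS =====

theorem tc_valid (a b c : Char)
    (ha : a = 'A' ∨ a = 'C' ∨ a = 'G' ∨ a = 'T')
    (hb : b = 'A' ∨ b = 'C' ∨ b = 'G' ∨ b = 'T')
    (hc : c = 'A' ∨ c = 'C' ∨ c = 'G' ∨ c = 'T') :
    ∃ aa, traduzCodao [a, b, c] = [aa] ∧
      (aa = '_' ↔ ([a, b, c] = ['T', 'A', 'A'] ∨ [a, b, c] = ['T', 'A', 'G'] ∨ [a, b, c] = ['T', 'G', 'A'])) := by
  rcases ha with rfl | rfl | rfl | rfl <;> rcases hb with rfl | rfl | rfl | rfl <;>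
    rcases hc with rfl | rfl | rfl | rfl <;> exact ⟨_, rfl, by decide⟩

theorem tc_invalid (cod : List Char)
    (h : ¬ cod.all (fun c => ['A', 'C', 'G', 'T'].contains c) = true) :
    traduzCodao cod = [] := by
  unfold traduzCodao
  cases hg : tcTable.get? cod with
  | none => rfl
  | some v =>
    exfalso
    have hm := PySem.Dict.mem_items_of_get?_eq_some tcTable hg
    simp only [tcTable] at hm
    fin_cases hm <;> simp_all

theorem scan_append (xs ys : List Char) : ∀ (i : Int) (acc : List Int),
    stopScan (xs ++ ys) i acc = stopScan ys (i + xs.length) (stopScan xs i acc) := by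
  induction xs with
  | nil => intro i acc; simp [stopScan]
  | cons c rest ih =>
    intro i acc
    simp only [List.cons_append, stopScan, ih, List.length_cons]
    congr 1
    push_cast
    ring

theorem slice3 (seq : List Char) (p : Int) (h0 : 0 ≤ p) (h3 : p + 3 ≤ (seq.length : Int)) :
    (PySem.List.slice seq (some p) (some (p + 3))).length = 3 := by
  rw [PySem.List.slice_toNat seq h0 (by omega)]
  simp
  omega

theorem main_invariant (seq : List Char) : ∀ (L : List Int),
    (∀ p ∈ L, 0 ≤ p ∧ p + 3 ≤ (seq.length : Int)) →
    ∀ (i : Int) (acc : List Int),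
      stopScan (L.flatMap (fun p => traduzCodao (PySem.List.slice seq (some p) (some (p + 3))))) i acc
        = (L.foldl
            (fun (st : List Int × Int) q =>
              let cod := PySem.List.slice seq (some q) (some (q + 3))
              if cod.all (fun c => ['A', 'C', 'G', 'T'].contains c) then
                (if cod = ['T', 'A', 'A'] ∨ cod = ['T', 'A', 'G'] ∨ cod = ['T', 'G', 'A'] then
                   st.1 ++ [st.2]
                 else st.1,
                 st.2 + 1)
              else st)
            (acc, i)).1 := by
  intro L
  induction L with
  | nil => intro _ i acc; simp [stopScan]
  | cons p L ih =>
    intro hL i acc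
    obtain ⟨hp0, hp3⟩ := hL p (by simp)
    obtain ⟨a, b, c, hsl⟩ := List.length_eq_three.mp (slice3 seq p hp0 hp3)
    rw [List.flatMap_cons, scan_append, List.foldl_cons, hsl]
    by_cases hall : ([a, b, c].all (fun c => ['A', 'C', 'G', 'T'].contains c)) = true
    · have hmem : (a = 'A' ∨ a = 'C' ∨ a = 'G' ∨ a = 'T') ∧ (b = 'A' ∨ b = 'C' ∨ b = 'G' ∨ b = 'T') ∧
          (c = 'A' ∨ c = 'C' ∨ c = 'G' ∨ c = 'T') := by
        simpa [List.all_cons, List.contains_cons, or_assoc] using hall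
      obtain ⟨aa, he, hiff⟩ := tc_valid a b c hmem.1 hmem.2.1 hmem.2.2
      rw [he]
      have hscan : stopScan [aa] i acc = (if ([a, b, c] = ['T', 'A', 'A'] ∨ [a, b, c] = ['T', 'A', 'G'] ∨ [a, b, c] = ['T', 'G', 'A']) then acc ++ [i] else acc) := by
        by_cases hd : aa = '_'
        · rw [if_pos (hiff.mp hd)]; simp [stopScan, hd]
        · rw [if_neg (fun hx => hd (hiff.mpr hx))]; simp [stopScan, hd]
      simp only [hall, if_true, List.length_cons, List.length_nil]
      rw [hscan]
      rw [ih (fun q hq => hL q (by simp [hq]))]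
      norm_num
    · rw [tc_invalid _ hall]
      simp only [hall]
      simp only [List.length_nil, Int.natCast_zero, add_zero, stopScan]
      exact ih (fun q hq => hL q (by simp [hq])) i acc

-- ===== VERDICT (by name: the statement is the Claim_ definition above) =====
theorem all_stop_spec : Claim_equal_all_stop := by
  intro dna _
  unfold Spec_all_stop all_stop all_stop_alt traduzSeq
  rw [PySem.List.foldl_append_eq_flatMap]
  simp only [List.nil_append]
  exact main_invariant _ _ (fun p hp => by
    have := ((PySem.List.mem_pyRange_iff_of_pos (s := 3) (by norm_num)) p).mp hp
    simp only [PySem.Chars.len_eq] at this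
    omega) 0 []
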